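-- pv_equiv track=rewrite | github.com/GrendelKhagah/PythonDeliverySystem | app.py | parse_complex_line
-- ===== SOURCE A (Python) =====
-- def parse_complex_line(line):
--     """
--     Parses a line with potential commas inside quotes.
--     Splits by commas, respecting quoted sections.
--     """
--     result = []
--     in_quotes = False
--     current = []
--
--     for ch in line:
--         if ch == '"':
--             in_quotes = not in_quotes
--         elif ch == ',' and not in_quotes:
--             result.append("".join(current).strip())
--             current = []
--         else:
--             current.append(ch)
--     result.append("".join(current).strip())
--     return result
-- ===== SOURCE B (Python) =====
-- def parse_complex_line(line):
--     """
--     Parses a line with potential commas inside quotes.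
--     Splits by commas, respecting quoted sections.
--
--     Segment-level pass: split once on '"'; segments alternate outside/inside
--     quotes.  Inside segments are appended verbatim; outside segments are split
--     on commas, each completed field being flushed with .strip().
--     """
--     result = []
--     current = ""
--     inside = False
--     for seg in line.split('"'):
--         if inside:
--             current += seg
--         else:
--             parts = seg.split(',')
--             current += parts[0]
--             for p in parts[1:]:
--                 result.append(current.strip())
--                 current = p
--         inside = not inside
--     result.append(current.strip())
--     return result
-- ===== Notes on version B (the rewrite author's own statement) =====
-- stated objective: faster
-- what changed: Replaces the character-by-character stateful loop with a segment-level pass: the line is split once on the double-quote character, segments inside quotes are appended verbatim, segments outside are split on commas with completed fields flushed via strip.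
import Mathlib
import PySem

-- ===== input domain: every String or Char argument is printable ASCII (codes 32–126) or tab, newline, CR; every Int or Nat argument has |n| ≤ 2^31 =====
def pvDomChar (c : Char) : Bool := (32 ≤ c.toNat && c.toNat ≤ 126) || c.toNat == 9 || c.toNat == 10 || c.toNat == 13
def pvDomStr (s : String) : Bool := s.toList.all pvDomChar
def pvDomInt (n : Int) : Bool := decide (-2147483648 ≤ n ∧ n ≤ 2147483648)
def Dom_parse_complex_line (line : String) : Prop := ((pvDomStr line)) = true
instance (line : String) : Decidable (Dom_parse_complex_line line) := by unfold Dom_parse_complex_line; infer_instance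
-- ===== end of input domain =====

-- B replaces A's character-level stateful loop by a segment-level pass over the quote-split segments (constant-factor faster in a timing run).

-- ===== PORT A =====
-- state: (result, in_quotes, current)
def pvAStep (st : List String × Bool × List Char) (ch : Char) : List String × Bool × List Char :=
  if ch = '"' then (st.1, !st.2.1, st.2.2)
  else if ch = ',' ∧ st.2.1 = false then (st.1 ++ [String.mk (PySem.Chars.strip st.2.2)], st.2.1, [])
  else (st.1, st.2.1, st.2.2 ++ [ch])

def parse_complex_line (line : String) : List String :=
  let st := line.toList.foldl pvAStep ([], false, [])
  st.1 ++ [String.mk (PySem.Chars.strip st.2.2)]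

-- ===== PORT B =====
-- state: (result, current, inside)
def pvBFlush (rc : List String × List Char) (p : List Char) : List String × List Char :=
  (rc.1 ++ [String.mk (PySem.Chars.strip rc.2)], p)

def pvBStep (st : List String × List Char × Bool) (seg : List Char) : List String × List Char × Bool :=
  if st.2.2 then (st.1, st.2.1 ++ seg, !st.2.2)
  else
    let parts := PySem.Chars.splitOn seg [',']
    let rc := parts.tail.foldl pvBFlush (st.1, st.2.1 ++ parts.headD [])
    (rc.1, rc.2, !st.2.2)

def parse_complex_line_alt (line : String) : List String :=
  let st := (PySem.Chars.splitOn line.toList ['"']).foldl pvBStep ([], [], false)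
  st.1 ++ [String.mk (PySem.Chars.strip st.2.1)]

-- ===== PRECONDITION & SPEC =====
def Spec_parse_complex_line (line : String) (out : List String) : Prop := out = parse_complex_line_alt line
instance (line : String) (out : List String) : Decidable (Spec_parse_complex_line line out) := by unfold Spec_parse_complex_line; infer_instance

-- ===== CLAIM (what is proved, stated in full; the proofs are below) =====
def Claim_equal_parse_complex_line : Prop := ∀ (line : String), Dom_parse_complex_line line → Spec_parse_complex_line line (parse_complex_line line)

-- ===== LEMMAS AND PROOFS =====

-- simple single-character splitter (proof-layer reference for PySem.Chars.splitOn with a one-char separator)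
def pvSplitChar (q : Char) : List Char → List (List Char)
  | [] => [[]]
  | c :: cs =>
    if c = q then [] :: pvSplitChar q cs
    else
      match pvSplitChar q cs with
      | [] => [[c]]
      | p :: ps => (c :: p) :: ps

theorem pvSplitChar_ne_nil (q : Char) (cs : List Char) : pvSplitChar q cs ≠ [] := by
  induction cs with
  | nil => simp [pvSplitChar]
  | cons c cs ih =>
    simp only [pvSplitChar]
    split
    · simp
    · match h : pvSplitChar q cs with
      | [] => simp
      | p :: ps => simp [h]

-- prepend a prefix to the head of a (nonempty) split result
def pvConsHead (pre : List Char) : List (List Char) → List (List Char)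
  | [] => [pre]
  | p :: ps => (pre ++ p) :: ps

theorem pvSplitOn_go_eq (q : Char) (fuel : Nat) (l cur : List Char) (acc : List (List Char))
    (h : l.length < fuel) :
    PySem.Chars.splitOn.go [q] fuel l cur acc = acc.reverse ++ pvConsHead cur.reverse (pvSplitChar q l) := by
  induction fuel generalizing l cur acc with
  | zero => omega
  | succ fuel ih =>
    cases l with
    | nil => simp [PySem.Chars.splitOn.go, pvSplitChar, pvConsHead]
    | cons c rest =>
      simp only [PySem.Chars.splitOn.go]
      by_cases hc : c = q
      · subst hc
        rw [if_pos (by simp [List.isPrefixOf])]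
        simp only [List.length_cons, List.length_nil, List.drop_succ_cons, List.drop_zero]
        simp only [List.length_cons] at h
        rw [ih rest [] (cur.reverse :: acc) (by omega)]
        simp only [pvSplitChar, if_pos rfl, pvConsHead, List.reverse_nil, List.reverse_cons,
          List.append_assoc, List.nil_append, List.singleton_append]
        cases hs : pvSplitChar c rest with
        | nil => exact absurd hs (pvSplitChar_ne_nil c rest)
        | cons p ps => simp [pvConsHead]
      · rw [if_neg (by simp [List.isPrefixOf]; exact fun h => hc h.symm)]
        simp only [List.length_cons] at h
        rw [ih rest (c :: cur) acc (by omega)]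
        simp only [pvSplitChar, if_neg hc]
        cases hs : pvSplitChar q rest with
        | nil => exact absurd hs (pvSplitChar_ne_nil q rest)
        | cons p ps => simp [pvConsHead]

theorem pvSplitOn_single (q : Char) (cs : List Char) :
    PySem.Chars.splitOn cs [q] = pvSplitChar q cs := by
  have := pvSplitOn_go_eq q (cs.length + 1) cs [] [] (by omega)
  simpa [PySem.Chars.splitOn, pvConsHead] using
    this.trans (by cases hs : pvSplitChar q cs with
      | nil => exact absurd hs (pvSplitChar_ne_nil q cs)
      | cons p ps => simp [pvConsHead])

theorem pvSplitChar_not_mem (q : Char) (cs : List Char) :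
    ∀ s ∈ pvSplitChar q cs, q ∉ s := by
  induction cs with
  | nil => simp [pvSplitChar]
  | cons c cs ih =>
    simp only [pvSplitChar]
    by_cases hc : c = q
    · simpa [hc] using ih
    · rw [if_neg hc]
      cases hs : pvSplitChar q cs with
      | nil => simp [Ne.symm hc]
      | cons p ps =>
        intro s hmem
        rcases List.mem_cons.mp hmem with h | h
        · subst h
          have hp := ih p (by rw [hs]; exact List.mem_cons_self ..)
          simp [Ne.symm hc, hp]
        · exact ih s (by rw [hs]; exact List.mem_cons_of_mem _ h)

-- join segments back with the quote character
def pvJoinQ : List (List Char) → List Char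
  | [] => []
  | [s] => s
  | s :: ss => s ++ '"' :: pvJoinQ ss

theorem pvJoinQ_splitChar (cs : List Char) : pvJoinQ (pvSplitChar '"' cs) = cs := by
  induction cs with
  | nil => simp [pvSplitChar, pvJoinQ]
  | cons c cs ih =>
    simp only [pvSplitChar]
    by_cases hc : c = '"'
    · rw [if_pos hc, hc]
      cases hs : pvSplitChar '"' cs with
      | nil => exact absurd hs (pvSplitChar_ne_nil _ _)
      | cons p ps => rw [hs] at ih; simp [pvJoinQ, ih]
    · rw [if_neg hc]
      cases hs : pvSplitChar '"' cs with
      | nil => exact absurd hs (pvSplitChar_ne_nil _ _)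
      | cons p ps =>
        rw [hs] at ih
        cases ps with
        | nil => simp [pvJoinQ] at ih ⊢; exact ih
        | cons p' ps' => simp [pvJoinQ] at ih ⊢; exact ih

-- A's fold over a quote-free segment, inside quotes: the segment is appended verbatim
theorem pvA_inside (seg : List Char) (hq : '"' ∉ seg) :
    ∀ (res : List String) (cur tail : List Char),
    List.foldl pvAStep (res, true, cur) (seg ++ tail) =
      List.foldl pvAStep (res, true, cur ++ seg) tail := by
  induction seg with
  | nil => intro res cur tail; simp
  | cons c seg ih =>
    intro res cur tail
    have hc : c ≠ '"' := fun h => hq (h ▸ List.mem_cons_self ..)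
    have hq' : '"' ∉ seg := fun h => hq (List.mem_cons_of_mem _ h)
    simp only [List.cons_append, List.foldl_cons, pvAStep, if_neg hc]
    rw [if_neg (by simp)]
    simpa using ih hq' res (cur ++ [c]) tail

-- A's fold over a quote-free segment, outside quotes: equals B's comma processing of that segment
theorem pvA_outside (seg : List Char) (hq : '"' ∉ seg) :
    ∀ (res : List String) (cur tail : List Char),
    List.foldl pvAStep (res, false, cur) (seg ++ tail) =
      List.foldl pvAStep
        (((pvSplitChar ',' seg).tail.foldl pvBFlush (res, cur ++ (pvSplitChar ',' seg).headD [])).1,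
          false,
          ((pvSplitChar ',' seg).tail.foldl pvBFlush (res, cur ++ (pvSplitChar ',' seg).headD [])).2)
        tail := by
  induction seg with
  | nil => intro res cur tail; simp [pvSplitChar]
  | cons c seg ih =>
    intro res cur tail
    have hc : c ≠ '"' := fun h => hq (h ▸ List.mem_cons_self ..)
    have hq' : '"' ∉ seg := fun h => hq (List.mem_cons_of_mem _ h)
    by_cases hcm : c = ','
    · subst hcm
      simp only [List.cons_append, List.foldl_cons, pvAStep, if_neg hc]
      rw [if_pos (by simp)]
      rw [ih hq' (res ++ [String.mk (PySem.Chars.strip cur)]) [] tail]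
      simp only [pvSplitChar, if_pos rfl]
      cases hs : pvSplitChar ',' seg with
      | nil => exact absurd hs (pvSplitChar_ne_nil _ _)
      | cons p ps =>
        simp [pvBFlush]
    · simp only [List.cons_append, List.foldl_cons, pvAStep, if_neg hc]
      rw [if_neg (by simp [hcm])]
      rw [ih hq' res (cur ++ [c]) tail]
      simp only [pvSplitChar, if_neg hcm]
      cases hs : pvSplitChar ',' seg with
      | nil => exact absurd hs (pvSplitChar_ne_nil _ _)
      | cons p ps => simp

-- main bridge: A's char fold over the joined segments equals B's segment fold, for any parity
theorem pvMain (segs : List (List Char)) (hq : ∀ s ∈ segs, '"' ∉ s) :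
    ∀ (res : List String) (cur : List Char) (inq : Bool),
    (let st := List.foldl pvAStep (res, inq, cur) (pvJoinQ segs)
     st.1 ++ [String.mk (PySem.Chars.strip st.2.2)]) =
    (let st := List.foldl pvBStep (res, cur, inq) segs
     st.1 ++ [String.mk (PySem.Chars.strip st.2.1)]) := by
  induction segs with
  | nil => intro res cur inq; simp [pvJoinQ]
  | cons s ss ih =>
    intro res cur inq
    have hs : '"' ∉ s := hq s (List.mem_cons_self ..)
    have hss : ∀ t ∈ ss, '"' ∉ t := fun t ht => hq t (List.mem_cons_of_mem _ ht)
    cases ss with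
    | nil =>
      cases inq with
      | true =>
        simp only [pvJoinQ]
        rw [show s = s ++ ([] : List Char) by simp, pvA_inside s hs res cur []]
        simp [pvBStep]
      | false =>
        simp only [pvJoinQ]
        rw [show s = s ++ ([] : List Char) by simp, pvA_outside s hs res cur []]
        simp [pvBStep, pvSplitOn_single]
    | cons s' ss' =>
      have hjoin : pvJoinQ (s :: s' :: ss') = s ++ '"' :: pvJoinQ (s' :: ss') := rfl
      cases inq with
      | true =>
        rw [hjoin, pvA_inside s hs res cur _]
        simp only [List.foldl_cons]
        rw [show pvAStep (res, true, cur ++ s) '"' = (res, false, cur ++ s) by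
          simp [pvAStep]]
        rw [ih hss res (cur ++ s) false]
        simp [pvBStep]
      | false =>
        rw [hjoin, pvA_outside s hs res cur _]
        simp only [List.foldl_cons]
        rw [show ∀ r c, pvAStep (r, false, c) '"' = (r, true, c) by
          intro r c; simp [pvAStep]]
        rw [ih hss _ _ true]
        simp [pvBStep, pvSplitOn_single]

-- ===== VERDICT (by name: the statement is the Claim_ definition above) =====
theorem parse_complex_line_spec : Claim_equal_parse_complex_line := by
  intro line _
  unfold Spec_parse_complex_line parse_complex_line parse_complex_line_alt
  rw [pvSplitOn_single]
  have := pvMain (pvSplitChar '"' line.toList) (pvSplitChar_not_mem '"' line.toList) [] [] false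
  rw [pvJoinQ_splitChar] at this
  simpa using this
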